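-- pv_equiv track=rewrite | github.com/qeedquan/challenges | project_euler/65-convergents-of-e.py | numerators
-- ===== SOURCE A (Python) =====
-- def numerators(n):
--     a = n*[0]
--     if n >= 1:
--         a[0] = 1
--     if n >= 2:
--         a[1] = 1
--     if n >= 3:
--         a[2] = 2
--     for i in range(3, n):
--         if i%3 != 1:
--             a[i] = a[i-1] + a[i-2]
--         else:
--             a[i] = 2*(i-1)*a[i-1]//3 + a[i-2]
--     return a
-- ===== SOURCE B (Python) =====
-- def _matmul(x, y):
--     return ((x[0][0] * y[0][0] + x[0][1] * y[1][0], x[0][0] * y[0][1] + x[0][1] * y[1][1]),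
--             (x[1][0] * y[0][0] + x[1][1] * y[1][0], x[1][0] * y[0][1] + x[1][1] * y[1][1]))
--
--
-- def numerators(n):
--     if n <= 0:
--         return []
--     # continued-fraction coefficients of the expansion whose convergents are returned:
--     # [1, 0, 1, 1] followed by the period-3 tail (2k, 1, 1) of e's expansion
--     c = [1, 0, 1, 1]
--     for k in range(1, (n + 2) // 3):
--         c += [2 * k, 1, 1]
--     c = c[:n]
--     # running product of the Moebius matrices [[b,1],[1,0]]; its top-left entry is
--     # the numerator (continuant) of the convergent ending at the current coefficient
--     out = []
--     m = ((1, 0), (0, 1))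
--     for b in c:
--         m = _matmul(m, ((b, 1), (1, 0)))
--         out.append(m[0][0])
--     return out
-- ===== Notes on version B (the rewrite author's own statement) =====
-- stated objective: alternative
-- what changed: B never runs A's branching three-term recurrence over an index-addressed array: it generates the continued-fraction coefficient list of e by its period-3 chunk pattern (no mod test, no division) and then maintains a running 2x2 Moebius-matrix product (numerator and denominator rows, general matrix multiply), reading each returned value off the product's top-left entry.
import Mathlib
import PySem

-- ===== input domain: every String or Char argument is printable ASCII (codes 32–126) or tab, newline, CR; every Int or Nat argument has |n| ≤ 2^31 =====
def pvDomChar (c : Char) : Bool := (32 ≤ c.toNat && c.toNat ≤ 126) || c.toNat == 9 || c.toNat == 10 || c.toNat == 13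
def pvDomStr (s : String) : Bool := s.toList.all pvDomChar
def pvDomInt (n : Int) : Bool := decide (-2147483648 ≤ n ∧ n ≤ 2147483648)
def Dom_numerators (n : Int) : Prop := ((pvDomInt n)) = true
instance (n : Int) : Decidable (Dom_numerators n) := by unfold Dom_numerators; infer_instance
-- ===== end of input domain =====

-- B replaces A's branching three-term recurrence over an index-addressed array by a running
-- 2x2 Moebius-matrix product over chunk-generated coefficients; objective: alternative, not faster.

-- ===== PORT A =====
-- loop body of A; all indices i, i-1, i-2 are in range for i in range(3, n), so pyGetD/pySetD are exact
def astep (a : List Int) (i : Int) : List Int :=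
  if PySem.Int.mod i 3 ≠ 1 then
    PySem.List.pySetD a i (PySem.List.pyGetD a (i - 1) 0 + PySem.List.pyGetD a (i - 2) 0)
  else
    PySem.List.pySetD a i
      (PySem.Int.floordiv (2 * (i - 1) * PySem.List.pyGetD a (i - 1) 0) 3 + PySem.List.pyGetD a (i - 2) 0)

def numerators (n : Int) : List Int :=
  let a := List.replicate n.toNat 0          -- n*[0] (empty for n ≤ 0, as in Python)
  let a := if 1 ≤ n then PySem.List.pySetD a 0 1 else a
  let a := if 2 ≤ n then PySem.List.pySetD a 1 1 else a
  let a := if 3 ≤ n then PySem.List.pySetD a 2 2 else a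
  (PySem.List.pyRange 3 n 1).foldl astep a

-- ===== PORT B =====
-- c = [1,0,1,1]; for k in range(1,(n+2)//3): c += [2*k,1,1]
def bbuild (n : Int) : List Int :=
  (PySem.List.pyRange 1 (PySem.Int.floordiv (n + 2) 3) 1).foldl
    (fun c k => c ++ [2 * k, 1, 1]) [1, 0, 1, 1]

def matmul (x y : (Int × Int) × (Int × Int)) : (Int × Int) × (Int × Int) :=
  ((x.1.1 * y.1.1 + x.1.2 * y.2.1, x.1.1 * y.1.2 + x.1.2 * y.2.2),
   (x.2.1 * y.1.1 + x.2.2 * y.2.1, x.2.1 * y.1.2 + x.2.2 * y.2.2))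

-- m = ((1,0),(0,1)); for b in c: m = _matmul(m, ((b,1),(1,0))); out.append(m[0][0])
def numerators_alt (n : Int) : List Int :=
  if n ≤ 0 then []
  else
    let c := PySem.List.slice (bbuild n) none (some n)     -- c = c[:n]
    (c.foldl
      (fun st b =>
        let m := matmul st.1 ((b, 1), (1, 0))
        (m, st.2 ++ [m.1.1]))
      (((1, 0), (0, 1)), [])).2

-- ===== PRECONDITION & SPEC =====
def Spec_numerators (n : Int) (out : List Int) : Prop := out = numerators_alt n
instance (n : Int) (out : List Int) : Decidable (Spec_numerators n out) := by unfold Spec_numerators; infer_instance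

-- ===== CLAIM (what is proved, stated in full; the proofs are below) =====
def Claim_equal_numerators : Prop := ∀ (n : Int), Dom_numerators n → Spec_numerators n (numerators n)

-- ===== LEMMAS AND PROOFS =====

-- continuant of a coefficient list, recursing on the HEAD (the value B's backward loop computes)
def cont : List Int → Int
  | [] => 1
  | [b] => b
  | a :: b :: l => a * cont (b :: l) + cont l

-- the companion continuant K(l without its last element) (0 for l = [])
def contD : List Int → Int
  | [] => 0
  | a :: l => cont ((a :: l).dropLast)

theorem contD_cons_cons (a c : Int) (t : List Int) :
    contD (a :: c :: t) = a * contD (c :: t) + contD t := by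
  cases t with
  | nil => simp [contD, cont]
  | cons d t' => simp only [contD, List.dropLast, cont]

theorem cont_snoc (l : List Int) (b : Int) :
    cont (l ++ [b]) = b * cont l + contD l := by
  induction l using cont.induct with
  | case1 => simp [cont, contD]
  | case2 a => simp [cont, contD]; ring
  | case3 a c t ih1 ih2 =>
    have hl : cont ((a :: c :: t) ++ [b]) = a * cont ((c :: t) ++ [b]) + cont (t ++ [b]) := by
      simp only [List.cons_append, cont]
    have hc : cont (a :: c :: t) = a * cont (c :: t) + cont t := by simp only [cont]
    rw [hl, ih1, ih2, hc, contD_cons_cons]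
    ring

theorem contD_snoc (l : List Int) (b : Int) : contD (l ++ [b]) = cont l := by
  cases l with
  | nil => simp [contD, cont]
  | cons a t =>
    simp only [List.cons_append, contD]
    rw [show a :: (t ++ [b]) = (a :: t) ++ [b] from rfl, List.dropLast_concat]

-- second row of the running matrix: the continuants of the consumed list minus its head
def row2 : List Int → Int × Int
  | [] => (0, 1)
  | _ :: t => (cont t, contD t)

-- invariant of B's loop: matrix rows are continuant pairs, out lists the prefix continuants
theorem bfold_spec (c : List Int) :
    c.foldl
        (fun st b =>
          let m := matmul st.1 ((b, 1), (1, 0))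
          (m, st.2 ++ [m.1.1]))
        ((((1 : Int), (0 : Int)), ((0 : Int), (1 : Int))), ([] : List Int)) =
      (((cont c, contD c), row2 c),
       (List.range c.length).map (fun k => cont (c.take (k + 1)))) := by
  induction c using List.reverseRecOn with
  | nil => simp [cont, contD, row2]
  | append_singleton l x ih =>
    rw [List.foldl_append, ih]
    have h11 : cont l * x + contD l * 1 = cont (l ++ [x]) := by rw [cont_snoc]; ring
    have h12 : cont l * 1 + contD l * 0 = contD (l ++ [x]) := by rw [contD_snoc]; ring
    have hrow2 : ((row2 l).1 * x + (row2 l).2 * 1, (row2 l).1 * 1 + (row2 l).2 * 0) =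
        row2 (l ++ [x]) := by
      cases l with
      | nil => simp [row2, cont, contD]
      | cons a t =>
        simp only [row2, List.cons_append]
        rw [Prod.mk.injEq, cont_snoc, contD_snoc]
        constructor <;> ring
    have hout : (List.range l.length).map (fun k => cont (l.take (k + 1))) ++ [cont (l ++ [x])] =
        (List.range (l ++ [x]).length).map (fun k => cont ((l ++ [x]).take (k + 1))) := by
      rw [List.length_append, List.length_singleton, List.range_succ, List.map_append]
      congr 1
      · apply List.map_congr_left
        intro k hk
        rw [List.mem_range] at hk
        rw [List.take_append_of_le_length (by omega)]
      · simp only [List.map_cons, List.map_nil]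
        rw [List.take_of_length_le (by simp)]
    refine Prod.ext (Prod.ext ?_ ?_) ?_
    · show (cont l * x + contD l * 1, cont l * 1 + contD l * 0) = _
      rw [Prod.mk.injEq]
      exact ⟨h11, h12⟩
    · show ((row2 l).1 * x + (row2 l).2 * 1, (row2 l).1 * 1 + (row2 l).2 * 0) = _
      exact hrow2
    · show (List.range l.length).map (fun k => cont (l.take (k + 1))) ++
          [cont l * x + contD l * 1] = _
      rw [h11]
      exact hout

-- closed form of B's coefficient-building loop
def chunks : Nat → List Int
  | 0 => [1, 0, 1, 1]
  | m + 1 => chunks m ++ [2 * ((m : Int) + 1), 1, 1]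

theorem length_chunks (m : Nat) : (chunks m).length = 4 + 3 * m := by
  induction m with
  | zero => rfl
  | succ m ih => simp [chunks, ih]; omega

theorem foldl_chunks (m : Nat) :
    (PySem.List.pyRange 1 (1 + (m : Int)) 1).foldl
      (fun c k => c ++ [2 * k, 1, 1]) [1, 0, 1, 1] = chunks m := by
  induction m with
  | zero => rw [PySem.List.pyRange_one_eq_nil (by norm_num)]; rfl
  | succ m ih =>
    have h : (1 : Int) + ((m : Nat) + 1 : Nat) = (1 + (m : Int)) + 1 := by push_cast; ring
    rw [h, PySem.List.pyRange_one_succ_right (by omega), List.foldl_append, ih]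
    simp only [List.foldl_cons, List.foldl_nil, chunks]
    congr 2
    ring

theorem chunks_getD (m i : Nat) (h3 : 3 ≤ i) (hi : i < 4 + 3 * m) :
    (chunks m).getD i 0 = if (i : Int) % 3 = 1 then 2 * ((i : Int) - 1) / 3 else 1 := by
  induction m with
  | zero =>
    have h : i = 3 := by omega
    subst h
    decide
  | succ m ih =>
    have hlen : (chunks m).length = 4 + 3 * m := length_chunks m
    by_cases h : i < 4 + 3 * m
    · rw [show chunks (m + 1) = chunks m ++ [2 * ((m : Int) + 1), 1, 1] from rfl,
          List.getD_append _ _ _ _ (by omega)]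
      exact ih h
    · rw [show chunks (m + 1) = chunks m ++ [2 * ((m : Int) + 1), 1, 1] from rfl,
          List.getD_append_right _ _ _ _ (by omega)]
      have hcase : i - (chunks m).length = 0 ∨ i - (chunks m).length = 1 ∨
          i - (chunks m).length = 2 := by
        have hl2 : (chunks (m+1)).length = 4 + 3 * (m+1) := length_chunks (m+1)
        omega
      rcases hcase with h0 | h1 | h2
      · rw [h0]
        have him : i = 4 + 3 * m := by omega
        have hmod : (i : Int) % 3 = 1 := by omega
        rw [if_pos hmod]
        have he : 2 * ((i : Int) - 1) = 3 * (2 * ((m : Int) + 1)) := by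
          have hi2 : (i : Int) = 4 + 3 * (m : Int) := by exact_mod_cast him
          rw [hi2]; ring
        simp only [List.getD_cons_zero]
        rw [he, Int.mul_ediv_cancel_left _ (by norm_num)]
      · rw [h1]
        have hmod : ¬ ((i : Int) % 3 = 1) := by omega
        rw [if_neg hmod]; rfl
      · rw [h2]
        have hmod : ¬ ((i : Int) % 3 = 1) := by omega
        rw [if_neg hmod]; rfl

-- ===== scaffolding shared with the old A-side proof =====

-- the branch-expressed coefficient table (proof-side reference only)
def bcoef (n : Int) : List Int :=
  (PySem.List.pyRange 0 n 1).map (fun i =>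
    if PySem.Int.mod i 3 = 1 then PySem.Int.floordiv (2 * (i - 1)) 3 else 1)

def bstep (c : List Int) (h : List Int) (i : Int) : List Int :=
  h ++ [PySem.List.pyGetD c i 0 * PySem.List.pyGetD h (-1) 0 + PySem.List.pyGetD h (-2) 0]

-- A's fold state started from the filled prefix [1,1,2] followed by zeros
def Fa (n : Int) (k : Int) : List Int :=
  (PySem.List.pyRange 3 k 1).foldl astep (1 :: 1 :: 2 :: List.replicate (n.toNat - 3) 0)

-- reference forward list (the growing prefix of computed values)
def Fb (n : Int) (k : Int) : List Int :=
  (PySem.List.pyRange 3 k 1).foldl (bstep (bcoef n)) [1, 1, 2]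

theorem step_eq (n : Int) (p rest : List Int) (k : Nat) (h3 : 3 ≤ k) (hk : (k : Int) < n)
    (hlen : p.length = k) :
    astep (p ++ 0 :: rest) (k : Int) = bstep (bcoef n) p (k : Int) ++ rest := by
  have h1 : k - 1 < p.length := by omega
  have h2 : k - 2 < p.length := by omega
  have hg1 : PySem.List.pyGetD (p ++ 0 :: rest) ((k : Int) - 1) 0 = p[k - 1] := by
    have hc : ((k : Int) - 1) = ((k - 1 : Nat) : Int) := by omega
    rw [hc, PySem.List.pyGetD_natCast, List.getD_append _ _ _ _ h1,
        List.getD_eq_getElem _ _ h1]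
  have hg2 : PySem.List.pyGetD (p ++ 0 :: rest) ((k : Int) - 2) 0 = p[k - 2] := by
    have hc : ((k : Int) - 2) = ((k - 2 : Nat) : Int) := by omega
    rw [hc, PySem.List.pyGetD_natCast, List.getD_append _ _ _ _ h2,
        List.getD_eq_getElem _ _ h2]
  have hb1 : PySem.List.pyGetD p (-1) 0 = p[k - 1] := by
    rw [PySem.List.pyGetD_neg_ofNat p 1 0 (by omega) (by omega)]
    simp [hlen]
  have hb2 : PySem.List.pyGetD p (-2) 0 = p[k - 2] := by
    rw [PySem.List.pyGetD_neg_ofNat p 2 0 (by omega) (by omega)]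
    simp [hlen]
  have hset : ∀ v : Int, PySem.List.pySetD (p ++ 0 :: rest) (k : Int) v = (p ++ [v]) ++ rest := by
    intro v
    rw [PySem.List.pySetD_of_nonneg _ _ (by omega)]
    have ht : ((k : Int)).toNat = k := by omega
    rw [ht, List.set_append, if_neg (by omega), hlen]
    simp
  have hcoef : PySem.List.pyGetD (bcoef n) (k : Int) 0 =
      if PySem.Int.mod (k : Int) 3 = 1 then PySem.Int.floordiv (2 * ((k : Int) - 1)) 3 else 1 := by
    unfold bcoef
    exact PySem.List.pyGetD_map_pyRange_of_nonneg _ n (k : Int) 0 (by omega) hk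
  have hmod : PySem.Int.mod (k : Int) 3 = (k : Int) % 3 :=
    PySem.Int.mod_eq_emod_of_pos (by norm_num)
  unfold astep bstep
  rw [hg1, hg2, hb1, hb2, hcoef, hmod]
  by_cases hm : (k : Int) % 3 = 1
  · rw [if_neg (by omega), if_pos hm, hset]
    have hdvd : (3 : Int) ∣ ((k : Int) - 1) := by omega
    obtain ⟨t, ht⟩ := hdvd
    have he : 2 * ((k : Int) - 1) = 3 * (2 * t) := by rw [ht]; ring
    rw [PySem.Int.floordiv_eq_ediv_of_pos (by norm_num),
        PySem.Int.floordiv_eq_ediv_of_pos (by norm_num)]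
    have hq1 : 2 * ((k : Int) - 1) * p[k - 1] / 3 = 2 * t * p[k - 1] := by
      rw [he, mul_assoc]
      exact Int.mul_ediv_cancel_left _ (by norm_num)
    have hq2 : 2 * ((k : Int) - 1) / 3 = 2 * t := by
      rw [he]
      exact Int.mul_ediv_cancel_left _ (by norm_num)
    rw [hq1, hq2]
  · rw [if_pos (by omega), if_neg hm, hset, one_mul]

theorem inv_main (n : Int) (hn : 3 ≤ n) :
    ∀ m : Nat, 3 + (m : Int) ≤ n →
      (Fb n (3 + (m : Int))).length = 3 + m ∧
      Fa n (3 + (m : Int)) = Fb n (3 + (m : Int)) ++ List.replicate (n.toNat - (3 + m)) 0 := by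
  intro m
  induction m with
  | zero =>
    intro _
    unfold Fa Fb
    rw [PySem.List.pyRange_one_eq_nil (by norm_num)]
    simp
  | succ m ih =>
    intro hm
    have hc2 : ((m + 1 : Nat) : Int) = (m : Int) + 1 := by push_cast; ring
    rw [hc2] at hm ⊢
    obtain ⟨hlen, heq⟩ := ih (by omega)
    have hrange : PySem.List.pyRange 3 (3 + ((m : Int) + 1)) 1 =
        PySem.List.pyRange 3 (3 + (m : Int)) 1 ++ [3 + (m : Int)] := by
      have h := PySem.List.pyRange_one_succ_right (a := 3) (b := 3 + (m : Int)) (by omega)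
      rw [← h]
      ring_nf
    have hFa : Fa n (3 + ((m : Int) + 1)) = astep (Fa n (3 + (m : Int))) (3 + (m : Int)) := by
      unfold Fa; rw [hrange, List.foldl_append]; rfl
    have hFb : Fb n (3 + ((m : Int) + 1)) =
        bstep (bcoef n) (Fb n (3 + (m : Int))) (3 + (m : Int)) := by
      unfold Fb; rw [hrange, List.foldl_append]; rfl
    have hrep : List.replicate (n.toNat - (3 + m)) (0 : Int) =
        0 :: List.replicate (n.toNat - (3 + (m + 1))) 0 := by
      have h1 : n.toNat - (3 + m) = (n.toNat - (3 + (m + 1))) + 1 := by omega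
      rw [h1, List.replicate_succ]
    have hcast : ((3 + m : Nat) : Int) = 3 + (m : Int) := by push_cast; ring
    constructor
    · rw [hFb]; unfold bstep; simp [hlen]; omega
    · rw [hFa, hFb, heq, hrep, ← hcast]
      exact step_eq n _ _ (3 + m) (by omega) (by omega) hlen

theorem numerators_eq_Fa (n : Int) (hn : 3 ≤ n) : numerators n = Fa n n := by
  simp only [numerators, Fa]
  rw [if_pos (show (1 : Int) ≤ n by omega), if_pos (show (2 : Int) ≤ n by omega),
      if_pos (show (3 : Int) ≤ n by omega)]
  congr 1
  have hN : n.toNat = (n.toNat - 3) + 1 + 1 + 1 := by omega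
  rw [hN]
  simp [List.replicate_succ, PySem.List.pySetD_of_nonneg]

-- ===== B-side: the backward evaluations reproduce the forward list =====

-- B's truncated coefficient list for n ≥ 3, as a take of chunks
theorem bbuild_eq (n : Int) (hn : 3 ≤ n) :
    bbuild n = chunks (PySem.Int.floordiv (n + 2) 3 - 1).toNat := by
  unfold bbuild
  have hfd : 1 ≤ PySem.Int.floordiv (n + 2) 3 := by
    have h := PySem.Int.floordiv_mul_add_mod (n + 2) 3
    have h1 := PySem.Int.mod_nonneg (n + 2) (b := 3) (by norm_num)
    have h2 := PySem.Int.mod_lt (n + 2) (b := 3) (by norm_num)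
    omega
  have h : PySem.Int.floordiv (n + 2) 3 =
      1 + ((PySem.Int.floordiv (n + 2) 3 - 1).toNat : Int) := by omega
  rw [h, foldl_chunks]
  congr 1
  omega

theorem chunks_len_ge (n : Int) (hn : 3 ≤ n) :
    n.toNat ≤ (chunks (PySem.Int.floordiv (n + 2) 3 - 1).toNat).length := by
  rw [length_chunks]
  have h := PySem.Int.floordiv_mul_add_mod (n + 2) 3
  have h1 := PySem.Int.mod_nonneg (n + 2) (b := 3) (by norm_num)
  have h2 := PySem.Int.mod_lt (n + 2) (b := 3) (by norm_num)
  omega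

theorem contD_ne_nil (l : List Int) (h : l ≠ []) : contD l = cont l.dropLast := by
  cases l with
  | nil => exact absurd rfl h
  | cons a t => rfl

theorem take_chunks_small (m k : Nat) (hk : k ≤ 4) :
    (chunks m).take k = [1, 0, 1, 1].take k := by
  induction m with
  | zero => rfl
  | succ m ih =>
    rw [show chunks (m + 1) = chunks m ++ [2 * ((m : Int) + 1), 1, 1] from rfl,
        List.take_append_of_le_length (by rw [length_chunks]; omega), ih]

-- B's truncated coefficient list c = c[:n]
def cT (n : Int) : List Int := PySem.List.slice (bbuild n) none (some n)

theorem cT_eq (n : Int) (hn : 3 ≤ n) :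
    cT n = (chunks (PySem.Int.floordiv (n + 2) 3 - 1).toNat).take n.toNat := by
  unfold cT
  rw [PySem.List.slice_to _ (by omega), bbuild_eq n hn]

theorem length_cT (n : Int) (hn : 3 ≤ n) : (cT n).length = n.toNat := by
  rw [cT_eq n hn, List.length_take]
  have := chunks_len_ge n hn
  omega

theorem cT_getD (n : Int) (hn : 3 ≤ n) (k : Nat) (h3 : 3 ≤ k) (hk : (k : Int) < n) :
    (cT n).getD k 0 = if (k : Int) % 3 = 1 then 2 * ((k : Int) - 1) / 3 else 1 := by
  have hkn : k < n.toNat := by omega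
  have hlc := chunks_len_ge n hn
  rw [cT_eq n hn, List.getD_eq_getElem _ _ (by rw [List.length_take]; omega),
      List.getElem_take, ← List.getD_eq_getElem _ _ (by omega)]
  rw [length_chunks] at hlc
  exact chunks_getD _ k h3 (by omega)

theorem cT_take_small (n : Int) (hn : 3 ≤ n) (k : Nat) (hk : k ≤ 3) :
    (cT n).take k = List.take k [1, 0, 1, 1] := by
  rw [cT_eq n hn, List.take_take, min_eq_left (by omega), take_chunks_small _ k (by omega)]

theorem cT_take_succ (n : Int) (hn : 3 ≤ n) (k : Nat) (hk : k < n.toNat) :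
    (cT n).take (k + 1) = (cT n).take k ++ [(cT n).getD k 0] := by
  have hlen : k < (cT n).length := by rw [length_cT n hn]; omega
  have h : (cT n)[k]? = some ((cT n).getD k 0) := by
    rw [List.getElem?_eq_getElem hlen, List.getD_eq_getElem _ _ hlen]
  rw [List.take_add_one, h]
  rfl

-- cont over growing prefixes of B's coefficient list equals the forward list Fb
theorem Gb_eq_Fb (n : Int) (hn : 3 ≤ n) :
    ∀ m : Nat, 3 + (m : Int) ≤ n →
      (PySem.List.pyRange 0 (3 + (m : Int)) 1).map
          (fun i => cont ((cT n).take (i + 1).toNat)) = Fb n (3 + (m : Int)) := by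
  intro m
  induction m with
  | zero =>
    intro _
    have hr : (3 : Int) + ((0 : Nat) : Int) = 3 := by norm_num
    rw [hr, show PySem.List.pyRange 0 3 1 = [0, 1, 2] from by decide]
    simp only [List.map_cons, List.map_nil]
    rw [show ((0 : Int) + 1).toNat = 1 from by omega, show ((1 : Int) + 1).toNat = 2 from by omega,
        show ((2 : Int) + 1).toNat = 3 from by omega,
        cT_take_small n hn 1 (by omega), cT_take_small n hn 2 (by omega),
        cT_take_small n hn 3 (by omega)]
    unfold Fb
    rw [PySem.List.pyRange_one_eq_nil (by norm_num)]
    rfl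
  | succ m ih =>
    intro hm
    have hsucc : (3 : Int) + ((m + 1 : Nat) : Int) = (3 + (m : Int)) + 1 := by push_cast; ring
    rw [hsucc] at hm ⊢
    have ih' := ih (by omega)
    obtain ⟨hlen, -⟩ := inv_main n hn m (by omega)
    have hFbElem : ∀ j : Nat, j < 3 + m →
        (Fb n (3 + (m : Int))).getD j 0 = cont ((cT n).take (j + 1)) := by
      intro j hj
      rw [← ih', List.getD_eq_getElem _ _
            (by rw [List.length_map, PySem.List.length_pyRange_one]; omega),
          List.getElem_map, PySem.List.getElem_pyRange_one,
          show ((0 : Int) + (j : Int) + 1).toNat = j + 1 from by omega]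
    rw [PySem.List.pyRange_one_succ_right (by omega : (0 : Int) ≤ 3 + (m : Int)),
        List.map_append, ih']
    have hFb : Fb n ((3 + (m : Int)) + 1) = bstep (bcoef n) (Fb n (3 + (m : Int))) (3 + (m : Int)) := by
      unfold Fb
      rw [PySem.List.pyRange_one_succ_right (by omega : (3 : Int) ≤ 3 + (m : Int)), List.foldl_append]
      rfl
    rw [hFb]
    unfold bstep
    congr 1
    have e1 : PySem.List.pyGetD (Fb n (3 + (m : Int))) (-1) 0 = cont ((cT n).take (3 + m)) := by
      rw [PySem.List.pyGetD_neg_ofNat _ 1 0 (by omega) (by omega),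
          ← List.getD_eq_getElem _ _ (by omega),
          show (Fb n (3 + (m : Int))).length - 1 = 2 + m from by omega]
      rw [hFbElem (2 + m) (by omega), show 2 + m + 1 = 3 + m from by omega]
    have e2 : PySem.List.pyGetD (Fb n (3 + (m : Int))) (-2) 0 = cont ((cT n).take (2 + m)) := by
      rw [PySem.List.pyGetD_neg_ofNat _ 2 0 (by omega) (by omega),
          ← List.getD_eq_getElem _ _ (by omega),
          show (Fb n (3 + (m : Int))).length - 2 = 1 + m from by omega]
      rw [hFbElem (1 + m) (by omega), show 1 + m + 1 = 2 + m from by omega]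
    have hcoef : PySem.List.pyGetD (bcoef n) (3 + (m : Int)) 0 = (cT n).getD (3 + m) 0 := by
      unfold bcoef
      rw [PySem.List.pyGetD_map_pyRange_of_nonneg _ n _ 0 (by omega) (by omega),
          cT_getD n hn (3 + m) (by omega) (by push_cast; omega),
          PySem.Int.mod_eq_emod_of_pos (by norm_num),
          PySem.Int.floordiv_eq_ediv_of_pos (by norm_num)]
      norm_cast
    have hval : cont ((cT n).take ((3 + (m : Int) + 1)).toNat) =
        (cT n).getD (3 + m) 0 * cont ((cT n).take (3 + m)) + cont ((cT n).take (2 + m)) := by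
      rw [show ((3 + (m : Int) + 1)).toNat = (3 + m) + 1 from by omega,
          cT_take_succ n hn (3 + m) (by omega), cont_snoc]
      have hne : (cT n).take (3 + m) ≠ [] := by
        apply List.ne_nil_of_length_pos
        rw [List.length_take, length_cT n hn]
        omega
      rw [contD_ne_nil _ hne,
          show (3 + m) = (2 + m) + 1 from by omega,
          cT_take_succ n hn (2 + m) (by omega), List.dropLast_concat]
    simp only [List.map_cons, List.map_nil]
    rw [hval, e1, e2, hcoef]

theorem numerators_spec : Claim_equal_numerators := by
  intro n _
  unfold Spec_numerators
  by_cases h0 : n ≤ 0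
  · simp only [numerators, numerators_alt]
    rw [if_pos h0, if_neg (show ¬(1 : Int) ≤ n by omega), if_neg (show ¬(2 : Int) ≤ n by omega),
        if_neg (show ¬(3 : Int) ≤ n by omega), PySem.List.pyRange_one_eq_nil (by omega)]
    simp [Int.toNat_of_nonpos h0]
  · by_cases h3 : n < 3
    · rcases (by omega : n = 1 ∨ n = 2) with h | h <;> subst h <;> decide
    · have hn : 3 ≤ n := by omega
      have hA : numerators n = Fb n n := by
        have hm : 3 + ((n.toNat - 3 : Nat) : Int) = n := by omega
        obtain ⟨-, heq⟩ := inv_main n hn (n.toNat - 3) (by omega)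
        rw [hm] at heq
        have hz : n.toNat - (3 + (n.toNat - 3)) = 0 := by omega
        rw [hz] at heq
        rw [numerators_eq_Fa n hn, heq]
        simp
      have hB : numerators_alt n = Fb n n := by
        unfold numerators_alt
        rw [if_neg (by omega)]
        show ((cT n).foldl
            (fun st b =>
              let m := matmul st.1 ((b, 1), (1, 0))
              (m, st.2 ++ [m.1.1]))
            (((1, 0), (0, 1)), [])).2 = Fb n n
        rw [bfold_spec, length_cT n hn]
        show (List.range n.toNat).map (fun k => cont ((cT n).take (k + 1))) = Fb n n
        have hbridge : (List.range n.toNat).map (fun k => cont ((cT n).take (k + 1)))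
            = (PySem.List.pyRange 0 n 1).map (fun i => cont ((cT n).take (i + 1).toNat)) := by
          apply List.ext_getElem
          · rw [List.length_map, List.length_map, List.length_range,
                PySem.List.length_pyRange_one]
            omega
          · intro i h1 h2
            rw [List.getElem_map, List.getElem_map, List.getElem_range,
                PySem.List.getElem_pyRange_one,
                show ((0 : Int) + (i : Int) + 1).toNat = i + 1 from by omega]
        have h := Gb_eq_Fb n hn (n.toNat - 3) (by omega)
        rw [show (3 : Int) + ((n.toNat - 3 : Nat) : Int) = n from by omega] at h
        rw [hbridge, h]
      rw [hA, hB]
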